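-- pv_equiv track=rewrite | github.com/2000023946/momo | h3.py | tennisMatch
-- ===== SOURCE A (Python) =====
-- def tennisMatch(player1, player2, record):
--     score1, score2 = 0, 0
--     point1, point2 = 0, 0
--     for n in record:
--         if n.isdigit():
--             if n == '1': point1 +=1
--             else: point2 +=1
--         else:
--             if point1 > point2: score1 +=1
--             elif point1 < point2: score2 +=1
--             point1, point2 = 0, 0
--     if score1 > score2:
--         return f"{player1} won! The score was {score1}-{score2}"
--     elif score1 < score2:
--         return f"{player2} won! The score was {score2}-{score1}"
--     return "It's a tie!"
-- ===== SOURCE B (Python) =====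
-- def tennisMatch(player1, player2, record):
--     # Segment the record into completed games, then score each game.
--     masked = ''.join(c if c.isdigit() else ' ' for c in record)
--     games = masked.split()
--     if record and record[-1].isdigit():
--         games.pop()  # trailing unterminated game is never scored
--     score1 = sum(1 for g in games if 2 * g.count('1') > len(g))
--     score2 = sum(1 for g in games if 2 * g.count('1') < len(g))
--     if score1 > score2:
--         return f"{player1} won! The score was {score1}-{score2}"
--     if score2 > score1:
--         return f"{player2} won! The score was {score2}-{score1}"
--     return "It's a tie!"
-- ===== Notes on version B (the rewrite author's own statement) =====
-- stated objective: alternative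
-- what changed: Replaces A's single stateful pass (running point counters reset at each separator) by a segment-then-count decomposition: mask non-digits to spaces, split the record into game segments, drop the unterminated trailing game, and score each segment by counting its '1's.
import Mathlib
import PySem

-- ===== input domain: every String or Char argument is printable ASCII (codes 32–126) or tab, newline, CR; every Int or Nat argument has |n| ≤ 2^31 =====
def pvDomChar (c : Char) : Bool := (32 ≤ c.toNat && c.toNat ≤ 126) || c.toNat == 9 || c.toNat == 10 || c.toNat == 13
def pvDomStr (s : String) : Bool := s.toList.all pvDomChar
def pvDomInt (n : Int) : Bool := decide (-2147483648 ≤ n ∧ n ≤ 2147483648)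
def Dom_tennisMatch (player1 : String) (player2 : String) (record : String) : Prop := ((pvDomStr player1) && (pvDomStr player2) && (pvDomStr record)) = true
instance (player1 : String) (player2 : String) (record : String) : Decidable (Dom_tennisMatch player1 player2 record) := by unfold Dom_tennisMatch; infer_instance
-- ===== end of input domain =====

-- B re-implements the match scorer by a different decomposition: mask-and-split the record
-- into completed game segments, then score each segment by counting; same return value as A.

-- ===== PORT A =====
-- loop body of A's `for n in record:` (state = (score1, score2, point1, point2))
def tMStep (st : Int × Int × Int × Int) (n : Char) : Int × Int × Int × Int :=
  if PySem.Chars.isdigit n then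
    if n = '1' then (st.1, st.2.1, st.2.2.1 + 1, st.2.2.2)
    else (st.1, st.2.1, st.2.2.1, st.2.2.2 + 1)
  else
    if st.2.2.1 > st.2.2.2 then (st.1 + 1, st.2.1, 0, 0)
    else if st.2.2.1 < st.2.2.2 then (st.1, st.2.1 + 1, 0, 0)
    else (st.1, st.2.1, 0, 0)

def tennisMatch (player1 : String) (player2 : String) (record : String) : String :=
  let st := record.toList.foldl tMStep (0, 0, 0, 0)
  if st.1 > st.2.1 then
    player1 ++ " won! The score was " ++ PySem.Int.toStr st.1 ++ "-" ++ PySem.Int.toStr st.2.1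
  else if st.1 < st.2.1 then
    player2 ++ " won! The score was " ++ PySem.Int.toStr st.2.1 ++ "-" ++ PySem.Int.toStr st.1
  else "It's a tie!"

-- ===== PORT B =====
def tennisMatch_alt (player1 : String) (player2 : String) (record : String) : String :=
  let cs := record.toList
  let masked := cs.map (fun c => if PySem.Chars.isdigit c then c else ' ')
  let games0 := PySem.Chars.split₀ masked
  let games :=
    match cs.getLast? with
    | some c => if PySem.Chars.isdigit c then games0.dropLast else games0
    | none => games0
  let score1 : Int := (games.countP (fun g => decide (g.length < 2 * PySem.Chars.count g ['1'])) : Int)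
  let score2 : Int := (games.countP (fun g => decide (2 * PySem.Chars.count g ['1'] < g.length)) : Int)
  if score1 > score2 then
    player1 ++ " won! The score was " ++ PySem.Int.toStr score1 ++ "-" ++ PySem.Int.toStr score2
  else if score2 > score1 then
    player2 ++ " won! The score was " ++ PySem.Int.toStr score2 ++ "-" ++ PySem.Int.toStr score1
  else "It's a tie!"

-- ===== PRECONDITION & SPEC =====
def Spec_tennisMatch (player1 : String) (player2 : String) (record : String) (out : String) : Prop := out = tennisMatch_alt player1 player2 record
instance (player1 : String) (player2 : String) (record : String) (out : String) : Decidable (Spec_tennisMatch player1 player2 record out) := by unfold Spec_tennisMatch; infer_instance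

-- ===== CLAIM (what is proved, stated in full; the proofs are below) =====
def Claim_equal_tennisMatch : Prop := ∀ (player1 : String) (player2 : String) (record : String), Dom_tennisMatch player1 player2 record → Spec_tennisMatch player1 player2 record (tennisMatch player1 player2 record)

-- ===== LEMMAS AND PROOFS =====

-- completed-and-current digit runs of cs, starting from open run cur (last element = open run)
def runsFull : List Char → List Char → List (List Char)
  | [], cur => [cur]
  | c :: r, cur => if PySem.Chars.isdigit c then runsFull r (cur ++ [c]) else cur :: runsFull r []

-- the open (unterminated) trailing run
def trailRun : List Char → List Char → List Char
  | [], cur => cur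
  | c :: r, cur => if PySem.Chars.isdigit c then trailRun r (cur ++ [c]) else trailRun r []

-- scoring one completed game, A's way
def scoreStep (s : Int × Int) (g : List Char) : Int × Int :=
  if ((g.count '1' : Int)) > ((g.length : Int) - g.count '1') then (s.1 + 1, s.2)
  else if ((g.count '1' : Int)) < ((g.length : Int) - g.count '1') then (s.1, s.2 + 1)
  else s

lemma count_go_single (c : Char) : ∀ (l : List Char) (fuel acc : Nat), l.length ≤ fuel →
    PySem.Chars.count.go [c] fuel l acc = acc + l.count c := by
  intro l
  induction l with
  | nil => intro fuel acc _; cases fuel <;> simp [PySem.Chars.count.go]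
  | cons h t ih =>
    intro fuel acc hle
    cases fuel with
    | zero => simp at hle
    | succ f =>
      simp only [PySem.Chars.count.go, List.isPrefixOf, List.count_cons]
      by_cases hc : c = h
      · subst hc
        simp only [BEq.rfl, Bool.and_true]
        rw [if_pos (by simp [List.isPrefixOf])]
        rw [show List.drop [c].length (c :: t) = t from rfl]
        rw [ih f (acc + 1) (by simpa using hle)]
        simp; omega
      · have hbe : (c == h) = false := by simp [hc]
        rw [if_neg (by simp [List.isPrefixOf, hbe])]
        rw [ih f acc (by simpa using hle)]
        simp [Ne.symm hc]


lemma chars_count_single (c : Char) (l : List Char) : PySem.Chars.count l [c] = l.count c := by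
  unfold PySem.Chars.count
  simp [count_go_single c l l.length 0 le_rfl]


lemma digit_not_space (c : Char) (h : PySem.Chars.isdigit c = true) : PySem.Chars.isspace c = false := by
  simp only [PySem.Chars.isdigit, Bool.and_eq_true, decide_eq_true_eq, Char.le_def] at h
  simp only [PySem.Chars.isspace]
  have h1 : 48 ≤ c.val.toNat := by
    have := h.1; change ('0':Char).val ≤ c.val at this
    have := UInt32.le_iff_toNat_le.mp this
    simpa using this
  have h2 : c.val.toNat ≤ 57 := by
    have := h.2; change c.val ≤ ('9':Char).val at this
    have := UInt32.le_iff_toNat_le.mp this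
    simpa using this
  simp only [Char.toNat, Bool.or_eq_false_iff, Bool.and_eq_false_iff,
    decide_eq_false_iff_not]
  omega


lemma runsFull_ne_nil : ∀ (cs cur : List Char), runsFull cs cur ≠ [] := by
  intro cs
  induction cs with
  | nil => intro cur; simp [runsFull]
  | cons c r ih => intro cur; simp only [runsFull]; split
                   · exact ih _
                   · simp


lemma runsFull_decomp : ∀ (cs cur : List Char),
    runsFull cs cur = (runsFull cs cur).dropLast ++ [trailRun cs cur] := by
  intro cs
  induction cs with
  | nil => intro cur; simp [runsFull, trailRun]
  | cons c r ih =>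
    intro cur
    by_cases hd : PySem.Chars.isdigit c
    · simp only [runsFull, trailRun, if_pos hd]; exact ih _
    · simp only [runsFull, trailRun, if_neg hd]
      rw [List.dropLast_cons_of_ne_nil (runsFull_ne_nil r [])]
      rw [List.cons_append, ← ih []]


lemma trail_digit : ∀ (cs cur : List Char) (h : cs ≠ []),
    (PySem.Chars.isdigit (cs.getLast h) = true → trailRun cs cur ≠ []) ∧
    (PySem.Chars.isdigit (cs.getLast h) = false → trailRun cs cur = []) := by
  intro cs
  induction cs with
  | nil => intro cur h; simp at h
  | cons c r ih =>
    intro cur h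
    cases r with
    | nil =>
      simp only [List.getLast_singleton, trailRun]
      constructor
      · intro hd; rw [if_pos hd]; simp
      · intro hd; rw [if_neg (by simp [hd])]
    | cons a b =>
      have hne : a :: b ≠ [] := by simp
      rw [List.getLast_cons hne]
      simp only [trailRun]
      constructor
      · intro hd; split <;> exact (ih _ hne).1 hd
      · intro hd; split <;> exact (ih _ hne).2 hd


lemma splitgo_masked : ∀ (cs cur : List Char) (acc : List (List Char)),
    PySem.Chars.split₀.go (cs.map (fun c => if PySem.Chars.isdigit c then c else ' ')) cur.reverse acc
      = acc.reverse ++ (runsFull cs cur).filter (fun g => !g.isEmpty) := by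
  intro cs
  induction cs with
  | nil =>
    intro cur acc
    simp only [List.map_nil, PySem.Chars.split₀.go, runsFull]
    cases cur with
    | nil => simp
    | cons a b => simp
  | cons c r ih =>
    intro cur acc
    simp only [List.map_cons, PySem.Chars.split₀.go, runsFull]
    by_cases hd : PySem.Chars.isdigit c
    · rw [if_pos hd, if_neg (by simp [digit_not_space c hd])]
      have : c :: cur.reverse = (cur ++ [c]).reverse := by simp
      rw [this, ih (cur ++ [c]) acc, if_pos hd]
    · rw [if_neg hd, if_pos (by decide), if_neg hd]
      cases cur with
      | nil =>
        simp only [List.reverse_nil, List.isEmpty_nil, if_pos rfl]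
        rw [show ([] : List Char) = ([] : List Char).reverse from rfl, ih [] acc]
        simp
      | cons a b =>
        rw [if_neg (by simp)]
        rw [List.reverse_reverse]
        rw [show ([] : List Char) = ([] : List Char).reverse from rfl, ih [] ((a :: b) :: acc)]
        simp


lemma foldA_eq : ∀ (cs cur : List Char) (s1 s2 : Int),
    cs.foldl tMStep (s1, s2, (cur.count '1' : Int), (cur.length : Int) - cur.count '1')
      = (((runsFull cs cur).dropLast.foldl scoreStep (s1, s2)).1,
         ((runsFull cs cur).dropLast.foldl scoreStep (s1, s2)).2,
         ((trailRun cs cur).count '1' : Int),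
         ((trailRun cs cur).length : Int) - (trailRun cs cur).count '1') := by
  intro cs
  induction cs with
  | nil => intro cur s1 s2; simp [runsFull, trailRun]
  | cons c r ih =>
    intro cur s1 s2
    simp only [List.foldl_cons, runsFull, trailRun]
    by_cases hd : PySem.Chars.isdigit c
    · rw [if_pos hd, if_pos hd]
      by_cases h1 : c = '1'
      · subst h1
        rw [show tMStep (s1, s2, (cur.count '1' : Int), (cur.length : Int) - cur.count '1') '1'
            = (s1, s2, ((cur ++ ['1']).count '1' : Int),
               ((cur ++ ['1']).length : Int) - (cur ++ ['1']).count '1') from by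
          simp [tMStep, hd, List.count_append, Prod.ext_iff]]
        exact ih (cur ++ ['1']) s1 s2
      · rw [show tMStep (s1, s2, (cur.count '1' : Int), (cur.length : Int) - cur.count '1') c
            = (s1, s2, ((cur ++ [c]).count '1' : Int),
               ((cur ++ [c]).length : Int) - (cur ++ [c]).count '1') from by
          simp [tMStep, hd, h1, List.count_append, Prod.ext_iff]
          push_cast; ring]
        exact ih (cur ++ [c]) s1 s2
    · rw [if_neg hd, if_neg hd]
      rw [List.dropLast_cons_of_ne_nil (runsFull_ne_nil r []), List.foldl_cons]
      rw [show tMStep (s1, s2, (cur.count '1' : Int), (cur.length : Int) - cur.count '1') c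
          = ((scoreStep (s1, s2) cur).1, (scoreStep (s1, s2) cur).2, (0 : Int), (0 : Int)) from by
        simp only [tMStep, scoreStep, if_neg hd]
        split_ifs <;> simp_all]
      have h := ih [] (scoreStep (s1, s2) cur).1 (scoreStep (s1, s2) cur).2
      simpa using h

lemma foldScore_counts : ∀ (l : List (List Char)) (s1 s2 : Int),
    l.foldl scoreStep (s1, s2)
      = (s1 + (l.countP (fun g => decide (g.length < 2 * g.count '1')) : Int),
         s2 + (l.countP (fun g => decide (2 * g.count '1' < g.length)) : Int)) := by
  intro l
  induction l with
  | nil => intro s1 s2; simp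
  | cons g l ih =>
    intro s1 s2
    have hc : List.count '1' g ≤ g.length := List.count_le_length
    simp only [List.foldl_cons, List.countP_cons, scoreStep]
    rcases lt_trichotomy (2 * List.count '1' g) g.length with h | h | h
    · rw [if_neg (by push_cast; omega), if_pos (by push_cast; omega), ih]
      have e1 : decide (g.length < 2 * List.count '1' g) = false := by simp; omega
      have e2 : decide (2 * List.count '1' g < g.length) = true := by simp [h]
      rw [e1, e2]
      simp only [Prod.mk.injEq]
      constructor <;> (push_cast; ring)
    · rw [if_neg (by push_cast; omega), if_neg (by push_cast; omega), ih]
      have e1 : decide (g.length < 2 * List.count '1' g) = false := by simp; omega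
      have e2 : decide (2 * List.count '1' g < g.length) = false := by simp; omega
      rw [e1, e2]
      simp
    · rw [if_pos (by push_cast; omega), ih]
      have e1 : decide (g.length < 2 * List.count '1' g) = true := by simp; omega
      have e2 : decide (2 * List.count '1' g < g.length) = false := by simp; omega
      rw [e1, e2]
      simp only [Prod.mk.injEq]
      constructor <;> (push_cast; ring)

lemma countP_map_filter1 (g : List Char) :
    (decide (g.length < 2 * PySem.Chars.count g ['1']) && !g.isEmpty)
      = decide (g.length < 2 * g.count '1') := by
  cases g with
  | nil => simp
  | cons a t => simp [chars_count_single]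

lemma countP_map_filter2 (g : List Char) :
    (decide (2 * PySem.Chars.count g ['1'] < g.length) && !g.isEmpty)
      = decide (2 * g.count '1' < g.length) := by
  cases g with
  | nil => simp
  | cons a t => simp [chars_count_single]

lemma gamesB_eq (cs : List Char) :
    (match cs.getLast? with
     | some c => if PySem.Chars.isdigit c then
         (PySem.Chars.split₀ (cs.map (fun c => if PySem.Chars.isdigit c then c else ' '))).dropLast
       else PySem.Chars.split₀ (cs.map (fun c => if PySem.Chars.isdigit c then c else ' '))
     | none => PySem.Chars.split₀ (cs.map (fun c => if PySem.Chars.isdigit c then c else ' ')))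
    = ((runsFull cs []).dropLast).filter (fun g => !g.isEmpty) := by
  have hsplit : PySem.Chars.split₀ (cs.map (fun c => if PySem.Chars.isdigit c then c else ' '))
      = (runsFull cs []).filter (fun g => !g.isEmpty) := by
    simpa [PySem.Chars.split₀] using splitgo_masked cs [] []
  cases hcs : cs.getLast? with
  | none =>
    have h0 : cs = [] := List.getLast?_eq_none_iff.mp hcs
    subst h0
    simpa [runsFull] using hsplit
  | some c =>
    have hne : cs ≠ [] := by rintro rfl; simp at hcs
    have hlast : cs.getLast hne = c := by
      have := List.getLast?_eq_some_getLast (l := cs) hne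
      rw [hcs] at this; exact (Option.some_inj.mp this).symm
    by_cases hd : PySem.Chars.isdigit c
    · simp only [hd, if_true]
      rw [hsplit]
      have ht : trailRun cs [] ≠ [] := (trail_digit cs [] hne).1 (hlast ▸ hd)
      conv_lhs => rw [runsFull_decomp cs [], List.filter_append]
      simp [ht]
    · simp only [hd, if_false]
      rw [hsplit]
      have ht : trailRun cs [] = [] := (trail_digit cs [] hne).2 (hlast ▸ (by simpa using hd))
      conv_lhs => rw [runsFull_decomp cs [], List.filter_append]
      simp [ht]

-- ===== VERDICT (by name: the statement is the Claim_ definition above) =====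
theorem tennisMatch_spec : Claim_equal_tennisMatch := by
  intro player1 player2 record _
  unfold Spec_tennisMatch
  show tennisMatch player1 player2 record = tennisMatch_alt player1 player2 record
  simp only [tennisMatch, tennisMatch_alt]
  rw [gamesB_eq record.toList]
  rw [show ((0 : Int), (0 : Int), (0 : Int), (0 : Int))
      = ((0 : Int), (0 : Int), ((([] : List Char).count '1' : Int)),
         ((([] : List Char).length : Int) - ([] : List Char).count '1')) from by simp]
  rw [foldA_eq record.toList [] 0 0]
  rw [foldScore_counts]
  rw [List.countP_filter, List.countP_filter]
  have hc1 : List.countP (fun g => decide (g.length < 2 * PySem.Chars.count g ['1']) && !g.isEmpty)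
        ((runsFull record.toList []).dropLast)
      = List.countP (fun g => decide (g.length < 2 * g.count '1')) ((runsFull record.toList []).dropLast) :=
    List.countP_congr (fun g _ => by rw [countP_map_filter1 g])
  have hc2 : List.countP (fun g => decide (2 * PySem.Chars.count g ['1'] < g.length) && !g.isEmpty)
        ((runsFull record.toList []).dropLast)
      = List.countP (fun g => decide (2 * g.count '1' < g.length)) ((runsFull record.toList []).dropLast) :=
    List.countP_congr (fun g _ => by rw [countP_map_filter2 g])
  rw [hc1, hc2]
  simp only [zero_add]
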